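-- pv_equiv track=rewrite | github.com/BillChan226/openenv-gen | openenv/examples/grpo_web/utils/prompts.py | _is_valid_action
-- ===== SOURCE A (Python) =====
-- def _is_valid_action(action: str) -> bool:
--     """
--     Check if an action string is a valid BrowserGym action.
--     """
--     valid_prefixes = [
--         "noop(",
--         "click(",
--         "fill(",
--         "type(",
--         "select(",
--         "scroll(",
--         "goto(",
--         "send_keys(",
--         "hover(",
--         "check(",
--         "uncheck(",
--         "press(",
--         "focus(",
--         "clear(",
--         "drag_and_drop(",
--         "upload_file(",
--     ]
--     return any(action.lower().startswith(prefix) for prefix in valid_prefixes)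
-- ===== SOURCE B (Python) =====
-- _VALID_NAMES = frozenset({
--     "noop", "click", "fill", "type", "select", "scroll", "goto",
--     "send_keys", "hover", "check", "uncheck", "press", "focus",
--     "clear", "drag_and_drop", "upload_file",
-- })
--
--
-- def _is_valid_action(action: str) -> bool:
--     s = action.lower()
--     i = s.find("(")
--     return i != -1 and s[:i] in _VALID_NAMES
-- ===== Notes on version B (the rewrite author's own statement) =====
-- stated objective: simpler
-- what changed: Instead of testing the lowercased string against 16 startswith prefixes, B parses the function-name token before the first '(' once and does a single set-membership check of that name.
import Mathlib
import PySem

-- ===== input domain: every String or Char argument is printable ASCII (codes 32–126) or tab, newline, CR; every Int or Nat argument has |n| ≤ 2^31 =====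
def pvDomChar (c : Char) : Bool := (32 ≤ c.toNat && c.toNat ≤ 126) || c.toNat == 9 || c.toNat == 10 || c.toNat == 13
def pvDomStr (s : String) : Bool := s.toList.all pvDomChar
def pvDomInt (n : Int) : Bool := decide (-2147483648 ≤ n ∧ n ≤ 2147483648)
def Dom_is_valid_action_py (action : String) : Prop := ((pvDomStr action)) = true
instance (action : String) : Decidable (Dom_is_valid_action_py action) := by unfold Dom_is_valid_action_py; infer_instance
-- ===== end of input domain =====

-- B replaces A's 16 startswith tests by parsing the name before the first '(' and one set-membership check (objective: simpler).

-- ===== PORT A =====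
def is_valid_action_py (action : String) : Bool :=
  let valid_prefixes : List String :=
    ["noop(", "click(", "fill(", "type(", "select(", "scroll(", "goto(",
     "send_keys(", "hover(", "check(", "uncheck(", "press(", "focus(",
     "clear(", "drag_and_drop(", "upload_file("]
  valid_prefixes.any (fun pfx => PySem.Str.startswith (PySem.Str.lower action) pfx)

-- ===== PORT B =====
def pvValidNames : PySem.Set String :=
  PySem.Set.ofList
    ["noop", "click", "fill", "type", "select", "scroll", "goto",
     "send_keys", "hover", "check", "uncheck", "press", "focus",
     "clear", "drag_and_drop", "upload_file"]

def is_valid_action_py_alt (action : String) : Bool :=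
  let s := PySem.Str.lower action
  let i := PySem.Str.find s "("
  (i != -1) && PySem.Set.contains pvValidNames (PySem.Str.slice s none (some i))

-- ===== PRECONDITION & SPEC =====
def Spec_is_valid_action_py (action : String) (out : Bool) : Prop := out = is_valid_action_py_alt action
instance (action : String) (out : Bool) : Decidable (Spec_is_valid_action_py action out) := by unfold Spec_is_valid_action_py; infer_instance

-- ===== CLAIM (what is proved, stated in full; the proofs are below) =====
def Claim_equal_is_valid_action_py : Prop := ∀ (action : String), Dom_is_valid_action_py action → Spec_is_valid_action_py action (is_valid_action_py action)

-- ===== LEMMAS AND PROOFS =====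

theorem singleton_prefix_iff_head (a : Char) (l : List Char) : [a] <+: l ↔ l.head? = some a := by
  cases l with
  | nil => simp
  | cons b t => simp [List.cons_prefix_iff, eq_comm]

theorem singleton_prefix_drop_iff (a : Char) (l : List Char) (j : Nat) :
    [a] <+: l.drop j ↔ l[j]? = some a := by
  rw [singleton_prefix_iff_head, List.head?_drop]

-- core: with k the index of the first '(' in L and a name n not containing '(',
-- "L starts with n ++ '('" is exactly "the text before the first '(' equals n"
theorem name_iff (L n : List Char) (k : Nat)
    (hk : L[k]? = some '(')
    (hmin : ∀ j, j < k → L[j]? ≠ some '(')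
    (hn : '(' ∉ n) :
    (n ++ ['(']) <+: L ↔ L.take k = n := by
  constructor
  · rintro ⟨t, ht⟩
    have hkeq : k = n.length := by
      rcases Nat.lt_trichotomy k n.length with h1 | h1 | h1
      · exfalso
        have hLk : L[k]? = some n[k] := by
          rw [← ht, List.append_assoc, List.getElem?_append_left (by omega : k < n.length)]
          simp [List.getElem?_eq_getElem h1]
        rw [hLk] at hk
        exact hn (Option.some.inj hk ▸ List.getElem_mem h1)
      · exact h1
      · exfalso
        apply hmin n.length h1
        rw [← ht, List.append_assoc, List.getElem?_append_right (le_refl n.length)]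
        simp
    subst hkeq
    rw [← ht, List.append_assoc, List.take_left]
  · intro h
    have hklen : k < L.length := by
      exact (List.getElem?_eq_some_iff.mp hk).1
    have hdrop : L.drop k = '(' :: L.drop (k + 1) := by
      rw [List.drop_eq_getElem_cons hklen]
      have : L[k] = '(' := by
        have := List.getElem?_eq_getElem hklen
        rw [hk] at this
        exact (Option.some.inj this).symm
      rw [this]
    refine ⟨L.drop (k + 1), ?_⟩
    rw [List.append_assoc, List.singleton_append, ← hdrop, ← h, List.take_append_drop]

theorem is_valid_action_py_spec_aux (action : String) :
    is_valid_action_py action = is_valid_action_py_alt action := by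
  simp only [is_valid_action_py, is_valid_action_py_alt, PySem.Str.startswith_eq,
    PySem.Str.toList_lower, PySem.Str.find_eq,
    show ("(" : String).toList = ['('] from rfl]
  set L := PySem.Chars.lower action.toList with hLdef
  by_cases h : PySem.Chars.find L ['('] = -1
  · -- no '(' anywhere: both sides are false
    rw [show PySem.Chars.find L (['(']) = -1 from h]
    simp only [bne_self_eq_false, Bool.false_and, List.any_eq_false]
    intro p hp
    have hmem : '(' ∈ p.toList := by fin_cases hp <;> decide
    intro hstart
    have hparen : '(' ∈ L := ((PySem.Chars.startswith_iff _ _).mp hstart).subset hmem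
    obtain ⟨u, v, huv⟩ := List.append_of_mem hparen
    exact (PySem.Chars.find_eq_neg_one_iff L ['(']).mp h ⟨u, v, by rw [huv]; simp⟩
  · -- there is a first '(' at index k := (find L "(").toNat
    have hnn : 0 ≤ PySem.Chars.find L ['('] := by
      have := PySem.Chars.neg_one_le_find L ['(']
      omega
    obtain ⟨hfst, hminp⟩ := PySem.Chars.find_spec hnn
    have hk : L[(PySem.Chars.find L ['(']).toNat]? = some '(' :=
      (singleton_prefix_drop_iff _ _ _).mp hfst
    have hmin : ∀ j, j < (PySem.Chars.find L ['(']).toNat → L[j]? ≠ some '(' :=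
      fun j hj hc => hminp j hj ((singleton_prefix_drop_iff _ _ _).mpr hc)
    have hne : (PySem.Chars.find L (['(']) != -1) = true := bne_iff_ne.mpr h
    rw [hne, Bool.true_and]
    have hstr : (PySem.Str.slice (PySem.Str.lower action) none
        (some (PySem.Chars.find L (['('])))).toList
        = L.take (PySem.Chars.find L ['(']).toNat := by
      rw [PySem.Str.toList_slice, PySem.Chars.slice_eq_listSlice, PySem.Str.toList_lower,
        ← hLdef, PySem.List.slice_to _ hnn]
    have hmap : (["noop(", "click(", "fill(", "type(", "select(", "scroll(", "goto(",
        "send_keys(", "hover(", "check(", "uncheck(", "press(", "focus(",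
        "clear(", "drag_and_drop(", "upload_file("] : List String)
        = (["noop", "click", "fill", "type", "select", "scroll", "goto",
        "send_keys", "hover", "check", "uncheck", "press", "focus",
        "clear", "drag_and_drop", "upload_file"] : List String).map (· ++ "(") := by decide
    rw [hmap, List.any_map]
    have hB : PySem.Set.contains pvValidNames (PySem.Str.slice (PySem.Str.lower action) none
        (some (PySem.Chars.find L (['(']))))
        = (["noop", "click", "fill", "type", "select", "scroll", "goto",
        "send_keys", "hover", "check", "uncheck", "press", "focus",
        "clear", "drag_and_drop", "upload_file"] : List String).any
          (fun nm => PySem.Str.slice (PySem.Str.lower action) none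
            (some (PySem.Chars.find L (['(']))) == nm) := by
      rw [Bool.eq_iff_iff, PySem.Set.contains_iff, List.any_eq_true]
      rw [pvValidNames, PySem.Set.mem_ofList]
      constructor
      · intro hm
        exact ⟨_, hm, by simp⟩
      · rintro ⟨nm, hm, he⟩
        rwa [beq_iff_eq.mp he]
    rw [hB]
    apply PySem.List.any_congr_mem
    intro nm hnm
    have hn : '(' ∉ nm.toList := by fin_cases hnm <;> decide
    rw [Bool.eq_iff_iff, Function.comp]
    rw [PySem.Chars.startswith_iff,
      show (nm ++ "(").toList = nm.toList ++ ['('] from by rw [String.toList_append]; rfl,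
      name_iff L nm.toList _ hk hmin hn, beq_iff_eq, String.ext_iff, hstr, eq_comm]

-- ===== VERDICT (by name: the statement is the Claim_ definition above) =====
theorem is_valid_action_py_spec : Claim_equal_is_valid_action_py := by
  intro action _
  unfold Spec_is_valid_action_py
  exact is_valid_action_py_spec_aux action
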